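-- pv_equiv track=rewrite | github.com/javedinfinite/practice_questions | trace.py | get_diagonal_sum_and_duplicate_rows
-- ===== SOURCE A (Python) =====
-- def get_diagonal_sum_and_duplicate_rows(matrix):
--     diag_sum = 0
--     no_duplicate_rows = 0
--     for x, arr in enumerate(matrix):
--         if(len(arr)!=len(set(arr))):
--             no_duplicate_rows+=1
--         for y, val in enumerate(arr):
--             if(x==y):
--                 diag_sum+=val
--     return(diag_sum,no_duplicate_rows)
-- ===== SOURCE B (Python) =====
-- def get_diagonal_sum_and_duplicate_rows(matrix):
--     # duplicate-row test by sorting and scanning adjacent pairs (no hashing)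
--     def has_dup(row):
--         s = sorted(row)
--         return any(a == b for a, b in zip(s, s[1:]))
--     dup = sum(map(has_dup, matrix))
--     # diagonal by peeling: add the top-left element, drop the first row and
--     # strip the first column of the remaining rows, repeat
--     diag = 0
--     rows = matrix
--     while rows:
--         head = rows[0]
--         if head:
--             diag += head[0]
--         rows = [r[1:] for r in rows[1:]]
--     return (diag, dup)
-- ===== Notes on version B (the rewrite author's own statement) =====
-- stated objective: alternative
-- what changed: Duplicate rows are detected by sorting each row and scanning adjacent pairs instead of building a set, and the diagonal is summed by a peel recursion (take the top-left element, drop the first row, strip the first column of the rest) with no index comparisons at all.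
import Mathlib
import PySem

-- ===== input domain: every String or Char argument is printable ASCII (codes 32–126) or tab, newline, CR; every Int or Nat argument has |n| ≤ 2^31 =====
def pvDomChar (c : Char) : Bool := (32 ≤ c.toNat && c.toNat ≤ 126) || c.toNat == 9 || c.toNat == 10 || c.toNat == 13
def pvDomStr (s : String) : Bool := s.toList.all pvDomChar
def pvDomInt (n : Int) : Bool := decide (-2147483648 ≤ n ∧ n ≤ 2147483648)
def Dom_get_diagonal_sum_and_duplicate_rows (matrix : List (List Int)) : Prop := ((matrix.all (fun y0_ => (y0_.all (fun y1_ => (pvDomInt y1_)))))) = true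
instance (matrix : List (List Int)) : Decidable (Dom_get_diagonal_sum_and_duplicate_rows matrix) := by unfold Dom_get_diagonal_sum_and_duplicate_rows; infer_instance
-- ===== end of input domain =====

-- B detects duplicate rows by sort-and-adjacent-scan instead of a set, and sums the
-- diagonal by peeling the first row and first column off the matrix: alternative algorithm.

-- ===== PORT A =====
-- inner loop: 'for y, val in enumerate(arr): if x == y: diag_sum += val'
def pvInnerA (x : Nat) : Nat → List Int → Int → Int
  | _, [], s => s
  | y, v :: rest, s => pvInnerA x (y + 1) rest (if x = y then s + v else s)

-- outer loop: 'for x, arr in enumerate(matrix): …' carrying (diag_sum, no_duplicate_rows)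
def pvLoopA : Nat → List (List Int) → Int × Int → Int × Int
  | _, [], st => st
  | x, arr :: rest, (ds, nd) =>
      let nd := if arr.length ≠ (PySem.Set.ofList arr).length then nd + 1 else nd
      let ds := pvInnerA x 0 arr ds
      pvLoopA (x + 1) rest (ds, nd)

def get_diagonal_sum_and_duplicate_rows (matrix : List (List Int)) : Int × Int :=
  pvLoopA 0 matrix (0, 0)

-- ===== PORT B =====
-- 'any(a == b for a, b in zip(s, s[1:]))' on the sorted row: adjacent-pair scan
def pvAdjEq : List Int → Bool
  | a :: b :: rest => a == b || pvAdjEq (b :: rest)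
  | _ => false

-- 'has_dup(row)': sort the row, scan adjacent pairs
def pvHasDup (row : List Int) : Bool :=
  pvAdjEq (PySem.List.sorted row (fun x => x) false)

-- 'dup = sum(map(has_dup, matrix))'
def pvDupB (matrix : List (List Int)) : Int :=
  matrix.foldl (fun c row => c + (if pvHasDup row then 1 else 0)) 0

-- the 'while rows:' peel loop; 'r[1:]' is List.tail (exact: PySem.List.slice_from_one)
def pvDiagPeel : List (List Int) → Int
  | [] => 0
  | head :: rest =>
      (if head ≠ [] then head.headD 0 else 0) + pvDiagPeel (rest.map List.tail)
termination_by m => m.length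
decreasing_by simp

def get_diagonal_sum_and_duplicate_rows_alt (matrix : List (List Int)) : Int × Int :=
  (pvDiagPeel matrix, pvDupB matrix)

-- ===== PRECONDITION & SPEC =====
def Spec_get_diagonal_sum_and_duplicate_rows (matrix : List (List Int)) (out : Int × Int) : Prop := out = get_diagonal_sum_and_duplicate_rows_alt matrix
instance (matrix : List (List Int)) (out : Int × Int) : Decidable (Spec_get_diagonal_sum_and_duplicate_rows matrix out) := by unfold Spec_get_diagonal_sum_and_duplicate_rows; infer_instance

-- ===== CLAIM =====
def Claim_equal_get_diagonal_sum_and_duplicate_rows : Prop := ∀ (matrix : List (List Int)), Dom_get_diagonal_sum_and_duplicate_rows matrix → Spec_get_diagonal_sum_and_duplicate_rows matrix (get_diagonal_sum_and_duplicate_rows matrix)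

-- ===== LEMMAS AND PROOFS =====

-- characterisation of A's inner scan: it adds arr[x-y] iff that index exists
theorem pvInnerA_eq (x : Nat) (arr : List Int) : ∀ (y : Nat) (s : Int),
    pvInnerA x y arr s =
      s + (if y ≤ x ∧ x - y < arr.length then arr.getD (x - y) 0 else 0) := by
  induction arr with
  | nil => intro y s; simp [pvInnerA]
  | cons v rest ih =>
    intro y s
    rw [pvInnerA, ih]
    by_cases hxy : x = y
    · subst hxy
      simp
    · rw [if_neg hxy]
      by_cases hle : y ≤ x
      · obtain ⟨k, hk⟩ : ∃ k, x - y = k + 1 := ⟨x - y - 1, by omega⟩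
        have hk' : x - (y + 1) = k := by omega
        rw [hk, hk']
        simp only [List.getD_cons_succ, List.length_cons]
        split_ifs with h1 h2 h2 <;> first | rfl | (exfalso; omega)
      · have h1 : ¬ (y + 1 ≤ x) := by omega
        simp [hle, h1]

-- index-style diagonal sum, the midpoint between A's loop and B's peel
def pvDiagIdx : Nat → List (List Int) → Int
  | _, [] => 0
  | x, row :: rest => (if x < row.length then row.getD x 0 else 0) + pvDiagIdx (x + 1) rest

theorem pvLoopA_eq (matrix : List (List Int)) : ∀ (x : Nat) (ds nd : Int),
    pvLoopA x matrix (ds, nd) =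
      (ds + pvDiagIdx x matrix,
       nd + matrix.foldl (fun c row => c + (if row.length ≠ (PySem.Set.ofList row).length then 1 else 0)) 0) := by
  induction matrix with
  | nil => intro x ds nd; simp [pvLoopA, pvDiagIdx]
  | cons arr rest ih =>
    intro x ds nd
    rw [pvLoopA]
    rw [ih, pvDiagIdx]
    rw [pvInnerA_eq]
    simp only [Nat.sub_zero, List.foldl_cons, Prod.mk.injEq]
    rw [PySem.List.foldl_add, PySem.List.foldl_add]
    constructor
    · split_ifs <;> omega
    · split_ifs <;> ring

-- peel = index-style sum, generalised over the number of stripped columns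
theorem pvDiagPeel_map_drop (matrix : List (List Int)) : ∀ (k : Nat),
    pvDiagPeel (matrix.map (List.drop k)) = pvDiagIdx k matrix := by
  induction matrix with
  | nil => intro k; rw [List.map_nil, pvDiagPeel, pvDiagIdx]
  | cons row rest ih =>
    intro k
    rw [List.map_cons, pvDiagPeel, pvDiagIdx]
    have htail : (rest.map (List.drop k)).map List.tail = rest.map (List.drop (k + 1)) := by
      rw [List.map_map]
      refine List.map_congr_left (fun r _ => ?_)
      simp [List.tail_drop]
    rw [htail, ih (k + 1)]
    congr 1
    by_cases h : k < row.length
    · have hne : row.drop k ≠ [] := by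
        simp [List.drop_eq_nil_iff]; omega
      rw [if_pos hne, if_pos h]
      have h0 : (row.drop k).headD 0 = (row.drop k).getD 0 0 := by
        cases row.drop k <;> rfl
      rw [h0]
      simp [List.getD, List.getElem?_drop]
    · have heq : row.drop k = [] := by
        simp [List.drop_eq_nil_iff]; omega
      simp [heq, h]

-- sort-and-scan finds no duplicate when all adjacent pairs (hence all pairs) differ
theorem pvAdjEq_false_of_pairwise_ne (s : List Int) (h : s.Pairwise (· ≠ ·)) :
    pvAdjEq s = false := by
  induction s with
  | nil => rfl
  | cons a t ih =>
    cases t with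
    | nil => rfl
    | cons b u =>
      rw [pvAdjEq]
      have hab : a ≠ b := (List.pairwise_cons.mp h).1 b (by simp)
      simp [hab, ih (List.pairwise_cons.mp h).2]

-- on a ≤-sorted list a duplicate shows up as an adjacent equal pair
theorem pvAdjEq_true_of_not_nodup (s : List Int) (hs : s.Pairwise (· ≤ ·))
    (h : ¬ s.Nodup) : pvAdjEq s = true := by
  induction s with
  | nil => exact absurd List.nodup_nil h
  | cons a t ih =>
    cases t with
    | nil => exact absurd (List.nodup_singleton a) h
    | cons b u =>
      rw [pvAdjEq]
      by_cases hab : a = b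
      · simp [hab]
      · have hcons := List.pairwise_cons.mp hs
        have hrest : ¬ (b :: u).Nodup := by
          intro hnd
          apply h
          refine List.nodup_cons.mpr ⟨?_, hnd⟩
          intro hmem
          rcases List.mem_cons.mp hmem with h1 | h1
          · exact hab h1
          · have hle : a ≤ b := hcons.1 b (by simp)
            have hle2 : b ≤ a := (List.pairwise_cons.mp hcons.2).1 a h1
            exact hab (le_antisymm hle hle2)
        simp [ih hcons.2 hrest]

theorem pvHasDup_iff (row : List Int) :
    pvHasDup row = true ↔ ¬ row.Nodup := by
  unfold pvHasDup
  have hperm : (PySem.List.sorted row (fun x => x) false).Perm row :=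
    PySem.List.sorted_perm row (fun x => x) false
  have hsorted : (PySem.List.sorted row (fun x => x) false).Pairwise (· ≤ ·) :=
    PySem.List.sorted_pairwise row (fun x => x)
  constructor
  · intro h hnd
    have hne : (PySem.List.sorted row (fun x => x) false).Pairwise (· ≠ ·) :=
      hperm.nodup_iff.mpr hnd
    rw [pvAdjEq_false_of_pairwise_ne _ hne] at h
    exact Bool.false_ne_true h
  · intro hnd
    exact pvAdjEq_true_of_not_nodup _ hsorted (fun h => hnd (hperm.nodup_iff.mp h))

-- set(row) is strictly shorter than row exactly when row has a duplicate
theorem ofList_length_lt_of_not_nodup (row : List Int) (h : ¬ row.Nodup) :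
    (PySem.Set.ofList row).length < row.length := by
  rcases lt_or_eq_of_le (PySem.Set.length_ofList_le row) with h1 | h1
  · exact h1
  · exfalso
    have hf : (PySem.Set.ofList row).toFinset = row.toFinset := by
      ext x; simp [PySem.Set.mem_ofList]
    have h2 : (PySem.Set.ofList row).toFinset.card = (PySem.Set.ofList row).length :=
      List.toFinset_card_of_nodup (PySem.Set.nodup_ofList row)
    have h3 : row.toFinset.card = row.dedup.length := List.card_toFinset row
    have h5 : row.dedup.length = row.length := by rw [← h3, ← hf, h2, h1]
    have h6 : row.dedup = row := (List.dedup_sublist row).eq_of_length h5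
    exact h (h6 ▸ List.nodup_dedup row)

-- A's per-row set test agrees with B's sort-and-scan test
theorem setlen_eq_hasDup (row : List Int) :
    (if row.length ≠ (PySem.Set.ofList row).length then (1:Int) else 0) =
      (if pvHasDup row then 1 else 0) := by
  by_cases h : row.Nodup
  · have heq : PySem.Set.ofList row = row := PySem.Set.ofList_eq_self_of_nodup row h
    have hd : pvHasDup row = false := by
      rcases Bool.eq_false_or_eq_true (pvHasDup row) with h1 | h1
      · exact absurd h ((pvHasDup_iff row).mp h1)
      · exact h1
    simp [heq, hd]
  · have hlt := ofList_length_lt_of_not_nodup row h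
    have h2 : pvHasDup row = true := (pvHasDup_iff row).mpr h
    simp [Nat.ne_of_gt hlt, h2]

-- ===== VERDICT =====
theorem get_diagonal_sum_and_duplicate_rows_spec : Claim_equal_get_diagonal_sum_and_duplicate_rows := by
  intro matrix _
  unfold Spec_get_diagonal_sum_and_duplicate_rows
  unfold get_diagonal_sum_and_duplicate_rows get_diagonal_sum_and_duplicate_rows_alt
  rw [pvLoopA_eq]
  have hd : pvDiagIdx 0 matrix = pvDiagPeel matrix := by
    rw [← pvDiagPeel_map_drop matrix 0]
    simp [List.map_congr_left (fun r _ => List.drop_zero)]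
  have hc : matrix.foldl (fun c row => c + (if row.length ≠ (PySem.Set.ofList row).length then 1 else 0)) 0 = pvDupB matrix := by
    unfold pvDupB
    exact PySem.List.foldl_congr_mem matrix _ _ 0 (fun c row _ => by rw [setlen_eq_hasDup])
  rw [hd, hc]
  simp only [zero_add]
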